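-- pv_equiv track=rewrite | github.com/aimhigh53/AlgoWing | MoonYeol/2회차/sw_advanced_greedy_1.py | solution
-- ===== SOURCE A (Python) =====
-- def solution(freight,truck):
--     answer = 0
--     temp = 0
--     is_break = False
--     freight.sort(reverse=True)
--     truck.sort(reverse=True)
--     for i in truck:
--         for j in freight:
--             if i >= j :
--                 answer += j
--                 temp = j
--                 is_break =True
--                 break
--         if is_break :
--             freight.remove(temp)
--             is_break=False
--     return answer
-- ===== SOURCE B (Python) =====
-- def solution(freight, truck):
--     fs = sorted(freight, reverse=True)
--     ts = sorted(truck, reverse=True)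
--     f = 0
--     total = 0
--     for t in ts:
--         while f < len(fs) and fs[f] > t:
--             f += 1
--         if f < len(fs):
--             total += fs[f]
--             f += 1
--     return total
-- ===== Notes on version B (the rewrite author's own statement) =====
-- stated objective: faster
-- what changed: Replaces the per-truck linear rescan and list.remove of the freight list by a single forward two-pointer sweep over both descending-sorted lists (and B does not mutate its arguments).
import Mathlib
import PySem

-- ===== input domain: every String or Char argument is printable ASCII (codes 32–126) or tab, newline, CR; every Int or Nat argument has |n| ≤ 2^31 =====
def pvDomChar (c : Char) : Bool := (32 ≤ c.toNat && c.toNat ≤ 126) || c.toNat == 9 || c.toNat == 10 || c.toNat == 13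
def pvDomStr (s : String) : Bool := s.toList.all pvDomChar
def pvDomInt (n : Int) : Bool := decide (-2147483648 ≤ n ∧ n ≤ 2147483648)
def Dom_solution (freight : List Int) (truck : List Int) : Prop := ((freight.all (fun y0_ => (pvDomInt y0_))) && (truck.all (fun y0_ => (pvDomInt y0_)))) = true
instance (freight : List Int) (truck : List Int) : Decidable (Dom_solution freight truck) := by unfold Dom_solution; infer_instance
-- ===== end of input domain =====

-- B replaces A's per-truck rescan+remove of the freight list by one two-pointer sweep over
-- both descending-sorted lists; equivalence is about the RETURN value only (Python A sorts
-- its argument lists in place and removes from freight; B leaves its arguments untouched).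

-- ===== PORT A =====
-- inner 'for j in freight: if i >= j: answer += j; temp = j; is_break = True; break'
def solInnerA (i : Int) (fs : List Int) (answer temp : Int) (isBreak : Bool) : Int × Int × Bool :=
  match fs with
  | [] => (answer, temp, isBreak)
  | j :: rest => if i ≥ j then (answer + j, j, true) else solInnerA i rest answer temp isBreak

-- outer 'for i in truck: … ; if is_break: freight.remove(temp); is_break = False'
-- freight.remove(temp) cannot raise here (temp was just found in freight); the impossible
-- none branch of remove? keeps fs unchanged.
def solOuterA (fs : List Int) (ts : List Int) (answer temp : Int) (isBreak : Bool) : Int :=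
  match ts with
  | [] => answer
  | i :: ts' =>
    let r := solInnerA i fs answer temp isBreak
    if r.2.2 then solOuterA ((PySem.List.remove? fs r.2.1).getD fs) ts' r.1 r.2.1 false
    else solOuterA fs ts' r.1 r.2.1 r.2.2

def solution (freight : List Int) (truck : List Int) : Int :=
  solOuterA (PySem.List.sorted freight (fun x => x) true)
            (PySem.List.sorted truck (fun x => x) true) 0 0 false

-- ===== PORT B =====
-- 'while f < len(fs) and fs[f] > t: f += 1' — advancing the pointer = dropping the prefix
def solDropB (t : Int) (fs : List Int) : List Int :=
  match fs with
  | [] => []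
  | j :: rest => if j > t then solDropB t rest else j :: rest

-- 'for t in ts: …'
def solGoB (fs ts : List Int) (total : Int) : Int :=
  match ts with
  | [] => total
  | t :: ts' =>
    match solDropB t fs with
    | [] => solGoB [] ts' total
    | j :: rest => solGoB rest ts' (total + j)

def solution_alt (freight : List Int) (truck : List Int) : Int :=
  solGoB (PySem.List.sorted freight (fun x => x) true)
         (PySem.List.sorted truck (fun x => x) true) 0

-- ===== PRECONDITION & SPEC =====
def Spec_solution (freight : List Int) (truck : List Int) (out : Int) : Prop := out = solution_alt freight truck
instance (freight : List Int) (truck : List Int) (out : Int) : Decidable (Spec_solution freight truck out) := by unfold Spec_solution; infer_instance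

-- ===== CLAIM (what is proved, stated in full; the proofs are below) =====
def Claim_equal_solution : Prop := ∀ (freight : List Int) (truck : List Int), Dom_solution freight truck → Spec_solution freight truck (solution freight truck)

-- ===== LEMMAS AND PROOFS =====

-- fs splits as a dropped prefix (all > t) followed by solDropB t fs
theorem solDropB_split (t : Int) (fs : List Int) :
    ∃ pre, fs = pre ++ solDropB t fs ∧ ∀ b ∈ pre, b > t := by
  induction fs with
  | nil => exact ⟨[], rfl, by simp⟩
  | cons j rest ih =>
    by_cases h : j > t
    · obtain ⟨pre, hp, hgt⟩ := ih
      refine ⟨j :: pre, ?_, ?_⟩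
      · simp only [solDropB, if_pos h]; exact congrArg (j :: ·) hp
      · intro b hb
        rcases List.mem_cons.1 hb with rfl | hb
        · exact h
        · exact hgt b hb
    · exact ⟨[], by simp [solDropB, h], by simp⟩

theorem solDropB_head_le (t : Int) (fs : List Int) (j : Int) (rest : List Int)
    (h : solDropB t fs = j :: rest) : j ≤ t := by
  induction fs with
  | nil => simp [solDropB] at h
  | cons x xs ih =>
    by_cases hx : x > t
    · simp only [solDropB, if_pos hx] at h; exact ih h
    · simp only [solDropB, if_neg hx, List.cons.injEq] at h
      omega

-- the inner loop skips a prefix whose elements are all > i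
theorem solInnerA_skip (i : Int) (pre fs : List Int) (a temp : Int)
    (hpre : ∀ b ∈ pre, b > i) :
    solInnerA i (pre ++ fs) a temp false = solInnerA i fs a temp false := by
  induction pre with
  | nil => rfl
  | cons b pre ih =>
    have hb : b > i := hpre b (by simp)
    have : ¬ i ≥ b := by omega
    simp [solInnerA, this]
    exact ih (fun c hc => hpre c (by simp [hc]))

-- the inner loop's result in terms of solDropB
theorem solInnerA_dropB (i : Int) (fs : List Int) (a temp : Int) :
    solInnerA i fs a temp false =
      match solDropB i fs with
      | [] => (a, temp, false)
      | j :: _ => (a + j, j, true) := by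
  induction fs with
  | nil => rfl
  | cons j rest ih =>
    by_cases h : j > i
    · have : ¬ i ≥ j := by omega
      simp [solInnerA, solDropB, this, h]; exact ih
    · have : i ≥ j := by omega
      simp [solInnerA, solDropB, this, h]

-- removing the first occurrence of j when the prefix cannot contain it
theorem remove_append (pre rest : List Int) (j : Int) (hpre : ∀ b ∈ pre, b ≠ j) :
    PySem.List.remove? (pre ++ j :: rest) j = some (pre ++ rest) := by
  induction pre with
  | nil => simp [PySem.List.remove?_cons_self]
  | cons b pre ih =>
    have hb : b ≠ j := hpre b (by simp)
    rw [List.cons_append, PySem.List.remove?_cons_of_ne _ hb,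
        ih (fun c hc => hpre c (by simp [hc]))]
    rfl

-- main invariant: A's freight list is B's remaining list plus a prefix of elements too
-- heavy for every remaining truck
theorem main_inv (ts : List Int) (bigs fs : List Int) (a temp : Int)
    (hts : ts.Pairwise (fun x y => x ≥ y))
    (hbigs : ∀ b ∈ bigs, ∀ t ∈ ts, b > t) :
    solOuterA (bigs ++ fs) ts a temp false = solGoB fs ts a := by
  induction ts generalizing bigs fs a temp with
  | nil => rfl
  | cons t ts' ih =>
    have hts' : ts'.Pairwise (fun x y => x ≥ y) := hts.tail
    have htge : ∀ t' ∈ ts', t ≥ t' := fun t' ht' => List.rel_of_pairwise_cons hts ht'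
    obtain ⟨pre, hsplit, hpre⟩ := solDropB_split t fs
    have hskip : solInnerA t (bigs ++ fs) a temp false = solInnerA t fs a temp false :=
      solInnerA_skip t bigs fs a temp (fun b hb => hbigs b hb t (by simp))
    cases hdrop : solDropB t fs with
    | nil =>
      have hfs : ∀ b ∈ fs, b > t := by
        intro b hb; rw [hsplit, hdrop, List.append_nil] at hb; exact hpre b hb
      have hb' : ∀ b ∈ bigs ++ fs, ∀ t' ∈ ts', b > t' := by
        intro b hb t' ht'
        rcases List.mem_append.1 hb with h | h
        · exact hbigs b h t' (by simp [ht'])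
        · exact lt_of_le_of_lt (htge t' ht') (hfs b h)
      have hIH := ih (bigs ++ fs) [] a temp hts' hb'
      simp only [solOuterA, hskip, solInnerA_dropB, hdrop, solGoB]
      simpa using hIH
    | cons j rest =>
      have hj : j ≤ t := solDropB_head_le t fs j rest hdrop
      have hprene : ∀ b ∈ bigs ++ pre, b ≠ j := by
        intro b hb
        rcases List.mem_append.1 hb with h | h
        · have := hbigs b h t (by simp); omega
        · have := hpre b h; omega
      have hshape : bigs ++ fs = (bigs ++ pre) ++ j :: rest := by
        rw [hsplit, hdrop]; simp
      simp only [solOuterA, hskip, solInnerA_dropB, hdrop]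
      rw [hshape, remove_append _ _ _ hprene]
      simp only [Option.getD_some]
      have hbigs' : ∀ b ∈ bigs ++ pre, ∀ t' ∈ ts', b > t' := by
        intro b hb t' ht'
        rcases List.mem_append.1 hb with h | h
        · exact hbigs b h t' (by simp [ht'])
        · exact lt_of_le_of_lt (htge t' ht') (hpre b h)
      have := ih (bigs ++ pre) rest (a + j) j hts' hbigs'
      simpa [solGoB, hdrop] using this

-- ===== VERDICT (by name: the statement is the Claim_ definition above) =====
theorem solution_spec : Claim_equal_solution := by
  intro freight truck _
  unfold Spec_solution solution solution_alt
  have hts : (PySem.List.sorted truck (fun x => x) true).Pairwise (fun x y => x ≥ y) := by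
    have := PySem.List.sorted_pairwise_rev truck (fun x => x)
    exact this.imp (fun h => h)
  have := main_inv (PySem.List.sorted truck (fun x => x) true)
    [] (PySem.List.sorted freight (fun x => x) true) 0 0 hts (by simp)
  simpa using this
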